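-- pv_equiv track=rewrite | github.com/r0hanshah/leetcode | statues.py | solution
-- ===== SOURCE A (Python) =====
-- def solution(statues):
--     statues.sort();
--     currentnum = statues[0]
--     sums = 0;
--     for index,num in enumerate(statues):
--         if num> currentnum:
--
--             if num != currentnum+1:
--                 sums += (statues[index] - statues[index-1])-1;
--                 currentnum = num;
--
--
--             else:
--                 currentnum= num
--     return sums;
-- ===== SOURCE B (Python) =====
-- # Closed form: answer = (max - min) - (number of distinct values - 1).
-- # (A sorts its argument in place; B does not mutate -- equivalence is about the return value.)
-- def solution(statues):
--     return (max(statues) - min(statues)) - (len(set(statues)) - 1)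
-- ===== Notes on version B (the rewrite author's own statement) =====
-- stated objective: simpler
-- what changed: Replaced sort-then-scan-adjacent-gaps with the one-line closed form (max-min)-(len(set)-1), no sorting and no index loop.
import Mathlib
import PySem

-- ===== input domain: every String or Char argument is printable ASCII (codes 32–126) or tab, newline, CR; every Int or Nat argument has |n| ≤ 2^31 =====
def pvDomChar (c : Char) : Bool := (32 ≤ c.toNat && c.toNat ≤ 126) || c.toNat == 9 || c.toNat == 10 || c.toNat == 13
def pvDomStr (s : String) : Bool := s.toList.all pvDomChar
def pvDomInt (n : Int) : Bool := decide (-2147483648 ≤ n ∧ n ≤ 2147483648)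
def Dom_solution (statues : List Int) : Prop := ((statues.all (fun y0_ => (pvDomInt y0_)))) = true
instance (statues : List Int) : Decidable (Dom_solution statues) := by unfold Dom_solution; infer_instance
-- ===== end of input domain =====

-- B replaces A's sort-then-scan-adjacent-gaps with the closed form
-- (max - min) - (distinct count - 1); A sorts its argument in place (B does not mutate),
-- so the equivalence proved here is about the return value only.

-- ===== PORT A =====
-- loop body of A's 'for index,num in enumerate(statues)', over the state (currentnum, sums)
def solBody (st : List Int) (acc : Int × Int) (p : Int × Int) : Int × Int :=
  if p.2 > acc.1 then
    if p.2 ≠ acc.1 + 1 then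
      (p.2, acc.2 + (PySem.List.pyGetD st p.1 0 - PySem.List.pyGetD st (p.1 - 1) 0) - 1)
    else (p.2, acc.2)
  else acc

def solution (statues : List Int) : Int :=
  let st := PySem.List.sorted statues (fun x => x) false
  let currentnum := PySem.List.pyGetD st 0 0   -- statues[0]; Pre_ excludes [] (IndexError)
  ((PySem.List.enumerate st 0).foldl (solBody st) (currentnum, 0)).2

-- ===== PORT B =====
def solution_alt (statues : List Int) : Int :=
  match PySem.List.max? statues (fun x => x), PySem.List.min? statues (fun x => x) with
  | some mx, some mn => (mx - mn) - (((PySem.Set.ofList statues).length : Int) - 1)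
  | _, _ => 0   -- unreachable under Pre_ (Python max/min of [] raise ValueError)

-- ===== PRECONDITION & SPEC =====
-- A raises IndexError on the empty list (statues[0]); excluded.
def Pre_solution (statues : List Int) : Prop := statues ≠ []
instance (statues : List Int) : Decidable (Pre_solution statues) := by unfold Pre_solution; infer_instance
def pvWitness_solution : List Int := ([1, 4, 4, 7])

def Spec_solution (statues : List Int) (out : Int) : Prop := out = solution_alt statues
instance (statues : List Int) (out : Int) : Decidable (Spec_solution statues out) := by unfold Spec_solution; infer_instance

-- ===== CLAIM (what is proved, stated in full; the proofs are below) =====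
def Claim_equal_solution : Prop := ∀ (statues : List Int), Dom_solution statues → Pre_solution statues → Spec_solution statues (solution statues)

-- ===== LEMMAS AND PROOFS =====

-- sum of the adjacent "missing statues" gaps of a (sorted) list
def gaps : List Int → Int
  | a :: b :: r => (if a < b then b - a - 1 else 0) + gaps (b :: r)
  | _ => 0

-- the last element, as a total function
def lastD (d : Int) : List Int → Int
  | [] => d
  | x :: xs => lastD x xs

theorem lastD_mem (d : Int) (l : List Int) (h : l ≠ []) : lastD d l ∈ l := by
  induction l generalizing d with
  | nil => simp at h
  | cons x xs ih =>
    cases xs with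
    | nil => simp [lastD]
    | cons y ys => simpa [lastD] using Or.inr (ih x (by simp))

theorem le_lastD (d : Int) (l : List Int) (hc : List.IsChain (· ≤ ·) (d :: l)) :
    ∀ y ∈ d :: l, y ≤ lastD d l := by
  induction l generalizing d with
  | nil => simp [lastD]
  | cons x xs ih =>
    rcases List.isChain_cons_cons.mp hc with ⟨hdx, hc'⟩
    intro y hy
    rcases List.mem_cons.mp hy with hy | hy
    · exact le_trans (le_of_eq hy) (le_trans hdx (ih x hc' x (by simp)))
    · exact ih x hc' y hy

-- main loop invariant: folding A's body over the suffix of the sorted list from index k,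
-- with currentnum equal to the element at index k-1, accumulates the adjacent gaps.
theorem loop_inv (st : List Int) (tail : List Int) :
    ∀ (k : Nat) (cur sums : Int), 1 ≤ k →
    st.drop (k - 1) = cur :: tail →
    List.IsChain (· ≤ ·) (cur :: tail) →
    (PySem.List.enumerate tail (k : Int)).foldl (solBody st) (cur, sums)
      = (lastD cur tail, sums + gaps (cur :: tail)) := by
  induction tail with
  | nil => intro k cur sums _ _ _; simp [PySem.List.enumerate, lastD, gaps]
  | cons x rest ih =>
    intro k cur sums hk hdrop hc
    rcases List.isChain_cons_cons.mp hc with ⟨hcx, hc'⟩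
    have hklen : k - 1 < st.length := by
      have h2 := congrArg List.length hdrop
      rw [List.length_drop, List.length_cons] at h2
      omega
    have hst_cur : st[k - 1]'hklen = cur := by
      have h0 : (st.drop (k - 1))[0]? = some cur := by rw [hdrop]; simp
      rw [List.getElem?_drop] at h0
      exact (List.getElem_eq_iff hklen).mpr (by simpa using h0)
    have hdrop' : st.drop k = x :: rest := by
      have h2 : st.drop (k - 1 + 1) = (st.drop (k - 1)).drop 1 := by
        rw [List.drop_drop]
      rw [hdrop] at h2
      have hk1 : k - 1 + 1 = k := by omega
      rw [hk1] at h2; simpa using h2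
    have hklen' : k < st.length := by
      have h2 := congrArg List.length hdrop'
      rw [List.length_drop, List.length_cons] at h2
      omega
    have hst_x : st[k]'hklen' = x := by
      have h0 : (st.drop k)[0]? = some x := by rw [hdrop']; simp
      rw [List.getElem?_drop] at h0
      exact (List.getElem_eq_iff hklen').mpr (by simpa using h0)
    have hget_x : PySem.List.pyGetD st (k : Int) 0 = x := by
      rw [PySem.List.pyGetD_eq_getElem st 0 (by omega) (by exact_mod_cast hklen')]
      simpa using hst_x
    have hget_cur : PySem.List.pyGetD st ((k : Int) - 1) 0 = cur := by
      have h1 : ((k : Int) - 1) = ((k - 1 : Nat) : Int) := by omega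
      rw [h1, PySem.List.pyGetD_eq_getElem st 0 (by omega) (by exact_mod_cast hklen)]
      simpa using hst_cur
    rw [PySem.List.enumerate_cons]
    have hstep : solBody st (cur, sums) ((k : Int), x)
        = (x, sums + (if cur < x then x - cur - 1 else 0)) := by
      unfold solBody
      simp only [hget_x, hget_cur]
      rcases lt_or_eq_of_le hcx with hlt | heq
      · by_cases h1 : x = cur + 1
        · simp [h1]
        · simp [hlt, h1]
          omega
      · simp [← heq]
    rw [List.foldl_cons, hstep]
    have hrec := ih (k + 1) x (sums + (if cur < x then x - cur - 1 else 0)) (by omega)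
      (by simpa using hdrop') (hc')
    push_cast at hrec ⊢
    rw [hrec]
    simp only [lastD, gaps, Prod.mk.injEq]
    exact ⟨by trivial, by split_ifs <;> omega⟩

-- the gap sum of a chain-sorted list is (last - first) - (distinct count - 1)
theorem gaps_closed (a : Int) (l : List Int) (hc : List.IsChain (· ≤ ·) (a :: l)) :
    gaps (a :: l) = (lastD a l - a) - (((PySem.Set.ofList (a :: l)).length : Int) - 1) := by
  induction l generalizing a with
  | nil => simp [gaps, lastD, PySem.Set.ofList_cons, PySem.Set.ofList_nil]
  | cons b r ih =>
    rcases List.isChain_cons_cons.mp hc with ⟨hab, hc'⟩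
    have hrec := ih b hc'
    by_cases hab2 : a = b
    · subst hab2
      have hmem : a ∈ PySem.Set.ofList (a :: r) := by rw [PySem.Set.mem_ofList]; simp
      have hnd : (PySem.Set.ofList (a :: r)).Nodup := PySem.Set.nodup_ofList (a :: r)
      have herase : (PySem.Set.ofList (a :: r)).discard a = (PySem.Set.ofList (a :: r)).erase a := by
        rw [List.Nodup.erase_eq_filter hnd a]; rfl
      have hpos : 0 < (PySem.Set.ofList (a :: r)).length := List.length_pos_of_mem hmem
      have hlen : (PySem.Set.ofList (a :: a :: r)).length = (PySem.Set.ofList (a :: r)).length := by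
        rw [PySem.Set.ofList_cons, List.length_cons, herase, List.length_erase_of_mem hmem]
        omega
      have hg : gaps (a :: a :: r) = gaps (a :: r) := by
        show (if a < a then a - a - 1 else 0) + gaps (a :: r) = gaps (a :: r)
        simp
      have hl : lastD a (a :: r) = lastD a r := by simp [lastD]
      rw [hg, hl, hlen, hrec]
    · have hlt : a < b := lt_of_le_of_ne hab hab2
      have hble : ∀ y ∈ b :: r, b ≤ y := by
        intro y hy
        rcases List.mem_cons.mp hy with hy | hy
        · exact le_of_eq hy.symm
        · exact List.rel_of_pairwise_cons (List.isChain_iff_pairwise.mp hc') hy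
      have hnotin : a ∉ PySem.Set.ofList (b :: r) := by
        rw [PySem.Set.mem_ofList]
        intro hmem
        exact absurd (hble a hmem) (by omega)
      have hdis : (PySem.Set.ofList (b :: r)).discard a = PySem.Set.ofList (b :: r) := by
        apply List.filter_eq_self.mpr
        intro y hy
        have hya : y ≠ a := fun heq => hnotin (heq ▸ hy)
        simp [hya]
      have hlen : (PySem.Set.ofList (a :: b :: r)).length
          = (PySem.Set.ofList (b :: r)).length + 1 := by
        rw [PySem.Set.ofList_cons, List.length_cons, hdis]
      have hg : gaps (a :: b :: r) = (b - a - 1) + gaps (b :: r) := by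
        show (if a < b then b - a - 1 else 0) + gaps (b :: r) = (b - a - 1) + gaps (b :: r)
        simp [hlt]
      have hl : lastD a (b :: r) = lastD b r := by simp [lastD]
      rw [hg, hl, hlen, hrec]
      push_cast
      ring

-- ===== VERDICT (by name: the statement is the Claim_ definition above) =====
theorem solution_spec : Claim_equal_solution := by
  unfold Claim_equal_solution
  intro statues _ hpre
  unfold Pre_solution at hpre
  unfold Spec_solution
  have hne : PySem.List.sorted statues (fun x => x) false ≠ [] := by
    rw [Ne, PySem.List.sorted_eq_nil_iff]; exact hpre
  obtain ⟨h, t, hht⟩ := List.exists_cons_of_ne_nil hne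
  have hpair : List.Pairwise (· ≤ ·) (h :: t) := by
    rw [← hht]; exact PySem.List.sorted_pairwise statues (fun x => x)
  have hchain : List.IsChain (· ≤ ·) (h :: t) := List.isChain_iff_pairwise.mpr hpair
  have hmemiff : ∀ x : Int, x ∈ statues ↔ x ∈ h :: t := by
    intro x
    rw [← hht]
    exact (PySem.List.mem_sorted statues (fun x => x) false x).symm
  -- A's loop value
  have hA : solution statues = gaps (h :: t) := by
    unfold solution
    rw [hht]
    simp only [PySem.List.pyGetD_zero_cons, PySem.List.enumerate_cons, List.foldl_cons]
    have hfirst : solBody (h :: t) (h, 0) (0, h) = (h, 0) := by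
      unfold solBody; simp
    rw [hfirst]
    have hloop := loop_inv (h :: t) t 1 h 0 (by omega) (by simp) hchain
    have : ((PySem.List.enumerate t ((1 : Nat) : Int)).foldl (solBody (h :: t)) (h, 0)).2
        = 0 + gaps (h :: t) := by rw [hloop]
    simpa using this
  -- B's max is the last of the sorted list, its min is the head
  have hmax : PySem.List.max? statues (fun x => x) = some (lastD h t) := by
    obtain ⟨m, hm⟩ : ∃ m, PySem.List.max? statues (fun x => x) = some m := by
      cases hcase : PySem.List.max? statues (fun x => x) with
      | none => exact absurd ((PySem.List.max?_eq_none_iff statues (fun x => x)).mp hcase) hpre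
      | some m => exact ⟨m, rfl⟩
    have h1 : lastD h t ≤ m := by
      apply PySem.List.max?_isMax hm
      rw [hmemiff]
      cases t with
      | nil => simp [lastD]
      | cons y ys =>
        show lastD y ys ∈ h :: y :: ys
        exact List.mem_cons_of_mem h (lastD_mem y (y :: ys) (by simp))
    have h2 : m ≤ lastD h t :=
      le_lastD h t hchain m ((hmemiff m).mp (PySem.List.max?_mem hm))
    rw [hm, le_antisymm h2 h1]
  have hmin : PySem.List.min? statues (fun x => x) = some h := by
    obtain ⟨m, hm⟩ : ∃ m, PySem.List.min? statues (fun x => x) = some m := by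
      cases hcase : PySem.List.min? statues (fun x => x) with
      | none => exact absurd ((PySem.List.min?_eq_none_iff statues (fun x => x)).mp hcase) hpre
      | some m => exact ⟨m, rfl⟩
    have h1 : m ≤ h := PySem.List.min?_isMin hm h ((hmemiff h).mpr (by simp))
    have h2 : h ≤ m :=
      PySem.List.key_head_sorted_le statues (fun x => x) hht m (PySem.List.min?_mem hm)
    rw [hm, le_antisymm h1 h2]
  -- the distinct counts of statues and of its sorted rearrangement agree
  have hsetlen : (PySem.Set.ofList statues).length = (PySem.Set.ofList (h :: t)).length := by
    apply List.Perm.length_eq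
    apply (List.perm_ext_iff_of_nodup (PySem.Set.nodup_ofList _) (PySem.Set.nodup_ofList _)).mpr
    intro x
    rw [PySem.Set.mem_ofList, PySem.Set.mem_ofList]
    exact hmemiff x
  unfold solution_alt
  rw [hmax, hmin, hA, hsetlen, gaps_closed h t hchain]
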